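-- pv_equiv track=rewrite | github.com/zeeshannisar/DSA-CycleGAN | CycleGAN_with_Self_Supervision/code/dataloader/pillow_API.py | getvalidinputsize
-- ===== SOURCE A (Python) =====
-- import math
--
-- def getvalidinputsize(inp_shape, depth=5, k_size=3, data_format='channels_last'):
--     convolutions_per_layer = 2
--
--     if data_format not in {'channels_first', 'channels_last'}:
--         raise ValueError('Unknown data_format: ', data_format)
--
--     def calculate(dim_size):
--         # Calculate what the last feature map size would be with this patch size
--         for _ in range(depth - 1):
--             dim_size = (dim_size - ((k_size - 1) * convolutions_per_layer)) / 2
--         dim_size -= (k_size - 1) * 2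
--
--         # Minimum possible size of last feature map
--         if dim_size < 4:
--             dim_size = 4
--
--         # Round to the next smallest even number
--         dim_size = math.floor(dim_size / 2.) * 2
--         # Calculate the original patch size to give this (valid) feature map size
--         for _ in range(depth - 1):
--             dim_size = (dim_size + (k_size - 1) * convolutions_per_layer) * 2
--         dim_size += (k_size - 1) * 2
--
--         return int(dim_size)
--
--     if data_format == 'channels_last':
--         spatial_dims = range(len(inp_shape))[:-1]
--     elif data_format == 'channels_first':
--         spatial_dims = range(len(inp_shape))[1:]
--
--     inp_shape = list(inp_shape)
--     for d in spatial_dims: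
--         inp_shape[d] = calculate(inp_shape[d])
--
--     return tuple(inp_shape)
-- ===== SOURCE B (Python) =====
-- def getvalidinputsize(inp_shape, depth=5, k_size=3, data_format='channels_last'):
--     if data_format not in {'channels_first', 'channels_last'}:
--         raise ValueError('Unknown data_format: ', data_format)
--
--     n = max(depth - 1, 0)          # number of down/up-sampling steps
--     p = 2 ** n
--     t = (k_size - 1) * 2           # size lost per level (2 convolutions of k_size)
--
--     def calculate(x):
--         # Exact closed form of the contraction: the shrunk size minus the last
--         # level's loss equals num / p with num = x - t*(2*p - 1).
--         num = x - t * (2 * p - 1)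
--         # Clamp at 4, then round down to the next even number.
--         d0 = 4 if num < 4 * p else (num // (2 * p)) * 2
--         # Closed form of the expansion back to the valid patch size.
--         return d0 * p + t * (2 * p - 1)
--
--     if data_format == 'channels_last':
--         lo, hi = 0, len(inp_shape) - 1
--     else:
--         lo, hi = 1, len(inp_shape)
--     return tuple(calculate(v) if lo <= d < hi else v
--                  for d, v in enumerate(inp_shape))
-- ===== Notes on version B (the rewrite author's own statement) =====
-- stated objective: alternative
-- what changed: Both (depth-1)-iteration loops inside calculate are replaced by exact integer closed forms (with p = 2^(depth-1): contracted numerator num = x - t*(2p-1), clamp/floor as a single integer floor division, reconstruction d0*p + t*(2p-1)), removing all floating-point arithmetic and the per-dimension loops.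
-- outside the precondition, e.g. on getvalidinputsize((8, 1), 25, 3, 'channels_last'): A returns (201326588, 1), B returns (201326588, 1); on getvalidinputsize((1, 0), 22, -2147483648, 'channels_last'): A returns (2, 0), B returns (-4194302, 0)
import Mathlib
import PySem

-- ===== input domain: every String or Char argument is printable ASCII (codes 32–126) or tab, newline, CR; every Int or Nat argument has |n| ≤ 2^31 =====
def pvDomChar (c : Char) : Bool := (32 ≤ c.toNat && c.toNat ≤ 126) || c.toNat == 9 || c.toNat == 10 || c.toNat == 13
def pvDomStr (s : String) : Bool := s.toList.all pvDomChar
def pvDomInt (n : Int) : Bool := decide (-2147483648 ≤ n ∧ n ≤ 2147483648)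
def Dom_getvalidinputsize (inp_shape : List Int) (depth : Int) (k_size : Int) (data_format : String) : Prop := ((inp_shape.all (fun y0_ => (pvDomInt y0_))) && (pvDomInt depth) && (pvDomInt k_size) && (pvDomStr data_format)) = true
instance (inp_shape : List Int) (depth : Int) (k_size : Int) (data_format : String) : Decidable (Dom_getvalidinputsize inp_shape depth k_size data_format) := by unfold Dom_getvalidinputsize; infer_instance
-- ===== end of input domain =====

-- B replaces the two (depth-1)-iteration loops of `calculate` by exact integer closed forms
-- (one floor division instead of repeated halving); A's Python float arithmetic is modelled by
-- exact rationals, which matches IEEE doubles exactly on every input Pre_ admits.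

-- ===== PORT A =====
-- first loop of calculate: for _ in range(depth-1): d = (d - t) / 2
def pvLoopDownA (t : ℚ) : Nat → ℚ → ℚ
  | 0, d => d
  | Nat.succ m, d => pvLoopDownA t m ((d - t) / 2)

-- second loop of calculate: for _ in range(depth-1): d = (d + t) * 2
def pvLoopUpA (t : ℚ) : Nat → ℚ → ℚ
  | 0, d => d
  | Nat.succ m, d => pvLoopUpA t m ((d + t) * 2)

def pvCalculateA (depth : Int) (k_size : Int) (x : Int) : Int :=
  let convolutions_per_layer : Int := 2
  -- range(depth - 1) iterates (depth - 1).toNat times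
  let d1 : ℚ := pvLoopDownA (((k_size - 1) * convolutions_per_layer : Int) : ℚ) (depth - 1).toNat (x : ℚ)
  let d2 : ℚ := d1 - ((k_size - 1) * 2 : Int)
  let d3 : ℚ := if d2 < 4 then (4 : ℚ) else d2
  let d4 : ℚ := (⌊d3 / 2⌋ : ℚ) * 2          -- math.floor(d / 2.) * 2
  let d5 : ℚ := pvLoopUpA (((k_size - 1) * convolutions_per_layer : Int) : ℚ) (depth - 1).toNat d4
  let d6 : ℚ := d5 + ((k_size - 1) * 2 : Int)
  ⌊d6⌋                                       -- int(): d6 is integer-valued here, so floor is exact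

def getvalidinputsize (inp_shape : List Int) (depth : Int) (k_size : Int) (data_format : String) : List Int :=
  if data_format = "channels_first" ∨ data_format = "channels_last" then
    -- spatial_dims = range(len)[:-1] (channels_last) / range(len)[1:] (channels_first);
    -- the write-back loop over spatial_dims rewrites exactly the slots whose index is spatial
    if data_format = "channels_last" then
      inp_shape.mapIdx (fun d v => if d + 1 < inp_shape.length then pvCalculateA depth k_size v else v)
    else
      inp_shape.mapIdx (fun d v => if 1 ≤ d then pvCalculateA depth k_size v else v)
  else []  -- raise ValueError: excluded by Pre_

-- ===== PORT B =====
def pvCalculateB (p : Int) (t : Int) (x : Int) : Int :=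
  let num := x - t * (2 * p - 1)
  let d0 : Int := if num < 4 * p then 4 else PySem.Int.floordiv num (2 * p) * 2
  d0 * p + t * (2 * p - 1)

def getvalidinputsize_alt (inp_shape : List Int) (depth : Int) (k_size : Int) (data_format : String) : List Int :=
  if data_format = "channels_first" ∨ data_format = "channels_last" then
    let n : Nat := (max (depth - 1) 0).toNat
    let p : Int := 2 ^ n
    let t : Int := (k_size - 1) * 2
    let lohi : Int × Int :=
      if data_format = "channels_last" then (0, (inp_shape.length : Int) - 1)
      else (1, (inp_shape.length : Int))
    (PySem.List.enumerate inp_shape).map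
      (fun dv => if lohi.1 ≤ dv.1 ∧ dv.1 < lohi.2 then pvCalculateB p t dv.2 else dv.2)
  else inp_shape  -- raise ValueError: excluded by Pre_

-- ===== PRECONDITION & SPEC =====
-- Pre_ excludes (a) data_format values outside {'channels_first','channels_last'}, on which A
-- raises ValueError, and (b) depth > 21, where A's IEEE-double arithmetic can round (and, for
-- very large depth, overflow to inf, so int() raises OverflowError): there A's returned value
-- is an artefact of binary floating point that exact integer arithmetic cannot reproduce; for
-- depth ≤ 21 every float step in A is exact for the |int| ≤ 2^31 domain, so the rational model
-- (and hence the claim) is faithful to the Python.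
def Pre_getvalidinputsize (inp_shape : List Int) (depth : Int) (k_size : Int) (data_format : String) : Prop :=
  (data_format = "channels_first" ∨ data_format = "channels_last") ∧ depth ≤ 21
instance (inp_shape : List Int) (depth : Int) (k_size : Int) (data_format : String) : Decidable (Pre_getvalidinputsize inp_shape depth k_size data_format) := by unfold Pre_getvalidinputsize; infer_instance

def pvWitness_getvalidinputsize : List Int × Int × Int × String := ([572, 572, 3], 5, 3, "channels_last")

def Spec_getvalidinputsize (inp_shape : List Int) (depth : Int) (k_size : Int) (data_format : String) (out : List Int) : Prop := out = getvalidinputsize_alt inp_shape depth k_size data_format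
instance (inp_shape : List Int) (depth : Int) (k_size : Int) (data_format : String) (out : List Int) : Decidable (Spec_getvalidinputsize inp_shape depth k_size data_format out) := by unfold Spec_getvalidinputsize; infer_instance

-- ===== CLAIM (what is proved, stated in full; the proofs are below) =====
def Claim_equal_getvalidinputsize : Prop := ∀ (inp_shape : List Int) (depth : Int) (k_size : Int) (data_format : String), Dom_getvalidinputsize inp_shape depth k_size data_format → Pre_getvalidinputsize inp_shape depth k_size data_format → Spec_getvalidinputsize inp_shape depth k_size data_format (getvalidinputsize inp_shape depth k_size data_format)

-- ===== LEMMAS AND PROOFS =====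

theorem pvLoopDownA_closed (t : ℚ) (n : Nat) (a : ℚ) :
    pvLoopDownA t n a = (a - t * (2 ^ n - 1)) / 2 ^ n := by
  induction n generalizing a with
  | zero => simp [pvLoopDownA]
  | succ m ih => rw [pvLoopDownA, ih]; field_simp; ring

theorem pvLoopUpA_closed (t : ℚ) (n : Nat) (a : ℚ) :
    pvLoopUpA t n a = a * 2 ^ n + t * (2 ^ (n + 1) - 2) := by
  induction n generalizing a with
  | zero => simp [pvLoopUpA]
  | succ m ih => rw [pvLoopUpA, ih]; ring

-- per-dimension agreement: A's rational pipeline equals B's integer closed form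
theorem pvCalculate_eq (depth k_size x : Int) :
    pvCalculateA depth k_size x
      = pvCalculateB (2 ^ (max (depth - 1) 0).toNat) ((k_size - 1) * 2) x := by
  have hmax : (max (depth - 1) 0).toNat = (depth - 1).toNat := by omega
  rw [hmax]
  set n := (depth - 1).toNat with hn
  unfold pvCalculateA pvCalculateB
  dsimp only
  rw [pvLoopDownA_closed, pvLoopUpA_closed]
  set num : Int := x - (k_size - 1) * 2 * (2 * 2 ^ n - 1) with hnum
  have hq2 : (0:ℚ) < (2:ℚ) ^ n := by positivity
  have hd2 : ((x : ℚ) - ((k_size - 1) * 2 : Int) * (2 ^ n - 1)) / 2 ^ n - ((k_size - 1) * 2 : Int)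
      = (num : ℚ) / 2 ^ n := by
    rw [hnum]; push_cast; field_simp; ring
  rw [hd2]
  have hcond : ((num : ℚ) / 2 ^ n < 4) ↔ (num < 4 * 2 ^ n) := by
    rw [div_lt_iff₀ hq2]
    constructor
    · intro h; exact_mod_cast h
    · intro h; exact_mod_cast h
  simp only [hcond]
  split_ifs with h
  · have h4 : ⌊(4 : ℚ) / 2⌋ = (2 : Int) := by norm_num
    rw [h4]
    have he : ((2 : Int) : ℚ) * 2 * 2 ^ n + ((k_size - 1) * 2 : Int) * (2 ^ (n + 1) - 2) + ((k_size - 1) * 2 : Int)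
        = ((4 * 2 ^ n + (k_size - 1) * 2 * (2 * 2 ^ n - 1) : Int) : ℚ) := by
      push_cast; ring
    rw [he, Int.floor_intCast]
  · have h2P : (2 * 2 ^ n : Int) = ((2 ^ (n + 1) : Nat) : Int) := by push_cast; ring
    have hdd : (num : ℚ) / 2 ^ n / 2 = (num : ℚ) / ((2 ^ (n + 1) : Nat) : ℚ) := by
      push_cast; field_simp; ring
    have hfloor : ⌊(num : ℚ) / 2 ^ n / 2⌋ = PySem.Int.floordiv num (2 * 2 ^ n) := by
      rw [hdd, PySem.Int.floordiv_eq_ediv_of_pos (by positivity), h2P]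
      exact Rat.floor_intCast_div_natCast num (2 ^ (n + 1))
    rw [hfloor]
    have he : ((PySem.Int.floordiv num (2 * 2 ^ n) : Int) : ℚ) * 2 * 2 ^ n
        + ((k_size - 1) * 2 : Int) * (2 ^ (n + 1) - 2) + ((k_size - 1) * 2 : Int)
        = ((PySem.Int.floordiv num (2 * 2 ^ n) * 2 * 2 ^ n + (k_size - 1) * 2 * (2 * 2 ^ n - 1) : Int) : ℚ) := by
      push_cast; ring
    rw [he, Int.floor_intCast]

-- the two index-conditional traversals agree slot by slot
theorem pvMap_eq (l : List Int) (depth k_size : Int) (lo hi : Int)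
    (condA : Nat → Prop) [DecidablePred condA]
    (hcond : ∀ i : Nat, i < l.length → (condA i ↔ (lo ≤ (i : Int) ∧ (i : Int) < hi))) :
    l.mapIdx (fun d v => if condA d then pvCalculateA depth k_size v else v)
      = (PySem.List.enumerate l).map
          (fun dv => if lo ≤ dv.1 ∧ dv.1 < hi then
              pvCalculateB (2 ^ (max (depth - 1) 0).toNat) ((k_size - 1) * 2) dv.2
            else dv.2) := by
  apply List.ext_getElem
  · simp [PySem.List.length_enumerate]
  · intro i h1 h2
    have hi : i < l.length := by simpa using h1
    rw [List.getElem_mapIdx, List.getElem_map, PySem.List.getElem_enumerate]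
    simp only [zero_add]
    by_cases hc : condA i
    · rw [if_pos hc, if_pos ((hcond i hi).mp hc)]
      exact pvCalculate_eq depth k_size l[i]
    · rw [if_neg hc, if_neg (fun hx => hc ((hcond i hi).mpr hx))]

-- ===== VERDICT (by name: the statement is the Claim_ definition above) =====
theorem getvalidinputsize_spec : Claim_equal_getvalidinputsize := by
  intro inp_shape depth k_size data_format _ hpre
  obtain ⟨hf, -⟩ := hpre
  unfold Spec_getvalidinputsize getvalidinputsize getvalidinputsize_alt
  rcases hf with h | h <;> subst h
  · -- channels_first
    rw [if_pos (Or.inl rfl), if_pos (Or.inl rfl), if_neg (by decide)]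
    dsimp only
    rw [if_neg (by decide)]
    exact pvMap_eq inp_shape depth k_size 1 (inp_shape.length : Int) _
      (fun i hi => by omega)
  · -- channels_last
    rw [if_pos (Or.inr rfl), if_pos (Or.inr rfl), if_pos rfl]
    dsimp only
    rw [if_pos rfl]
    exact pvMap_eq inp_shape depth k_size 0 ((inp_shape.length : Int) - 1) _
      (fun i hi => by omega)
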